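-- pv_equiv track=rewrite | github.com/ethanton0927/Midterm | Summer_2018.py | sabacc_winnder
-- ===== SOURCE A (Python) =====
-- def sabacc_winnder(cards, player0, player1):
--     if cards == 0:
--         return player0
--     if cards == 1:
--         return player1
--     take_one = sabacc_winnder(cards - 1, player1, player0)
--     take_two = sabacc_winnder(cards - 2, player1, player0)
--     if take_one == player0 or take_two == player0:
--         return player0
--     return player1
-- ===== SOURCE B (Python) =====
-- def sabacc_winnder(cards, player0, player1):
--     # Closed form: with optimal play the second player to move wins exactly
--     # when cards % 3 == 1; otherwise the first player wins.
--     return player1 if cards % 3 == 1 else player0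
-- ===== Notes on version B (the rewrite author's own statement) =====
-- stated objective: simpler
-- what changed: Replaces the exponential two-branch game recursion by the one-line closed form: the winner is player1 exactly when cards % 3 == 1, else player0.
import Mathlib
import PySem

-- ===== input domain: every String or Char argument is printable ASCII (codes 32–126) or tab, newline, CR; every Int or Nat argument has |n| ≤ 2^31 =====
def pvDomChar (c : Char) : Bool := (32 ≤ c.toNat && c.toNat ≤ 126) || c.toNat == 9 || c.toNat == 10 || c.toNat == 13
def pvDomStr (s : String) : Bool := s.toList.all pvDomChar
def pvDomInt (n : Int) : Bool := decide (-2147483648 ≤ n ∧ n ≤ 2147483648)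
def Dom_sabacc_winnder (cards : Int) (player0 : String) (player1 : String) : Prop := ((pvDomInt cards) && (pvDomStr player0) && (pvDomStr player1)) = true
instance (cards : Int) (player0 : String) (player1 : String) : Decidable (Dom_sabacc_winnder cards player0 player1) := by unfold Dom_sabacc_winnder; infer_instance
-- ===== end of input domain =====

-- B replaces A's two-branch game recursion by the one-line closed form:
-- the winner is player1 exactly when cards % 3 == 1, else player0.


-- ===== PORT A =====
-- A's recursion, on the Nat value of cards (Python diverges for cards < 0; Pre_ excludes those).
def sabaccRecA : Nat → String → String → String
  | 0, player0, _ => player0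
  | 1, _, player1 => player1
  | n + 2, player0, player1 =>
    let take_one := sabaccRecA (n + 1) player1 player0
    let take_two := sabaccRecA n player1 player0
    if take_one = player0 ∨ take_two = player0 then player0 else player1

def sabacc_winnder (cards : Int) (player0 : String) (player1 : String) : String :=
  sabaccRecA cards.toNat player0 player1

-- ===== PORT B =====
def sabacc_winnder_alt (cards : Int) (player0 : String) (player1 : String) : String :=
  if PySem.Int.mod cards 3 = 1 then player1 else player0

-- ===== PRECONDITION & SPEC =====
-- Pre_ excludes cards < 0, where Python A recurses forever (RecursionError).
def Pre_sabacc_winnder (cards : Int) (player0 : String) (player1 : String) : Prop := 0 ≤ cards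
instance (cards : Int) (player0 : String) (player1 : String) : Decidable (Pre_sabacc_winnder cards player0 player1) := by unfold Pre_sabacc_winnder; infer_instance
def pvWitness_sabacc_winnder : Int × String × String := (5, "Han", "Lando")

def Spec_sabacc_winnder (cards : Int) (player0 : String) (player1 : String) (out : String) : Prop := out = sabacc_winnder_alt cards player0 player1
instance (cards : Int) (player0 : String) (player1 : String) (out : String) : Decidable (Spec_sabacc_winnder cards player0 player1 out) := by unfold Spec_sabacc_winnder; infer_instance

-- ===== CLAIM (what is proved, stated in full; the proofs are below) =====
def Claim_equal_sabacc_winnder : Prop := ∀ (cards : Int) (player0 : String) (player1 : String), Dom_sabacc_winnder cards player0 player1 → Pre_sabacc_winnder cards player0 player1 → Spec_sabacc_winnder cards player0 player1 (sabacc_winnder cards player0 player1)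

-- ===== LEMMAS AND PROOFS =====
-- A's recursion computes the mod-3 closed form.
theorem sabaccRecA_closed : ∀ (n : Nat) (p0 p1 : String),
    sabaccRecA n p0 p1 = if n % 3 = 1 then p1 else p0 := by
  intro n
  induction n using Nat.strong_induction_on with
  | _ n ih =>
    match n with
    | 0 => intro p0 p1; simp [sabaccRecA]
    | 1 => intro p0 p1; simp [sabaccRecA]
    | n + 2 =>
      intro p0 p1
      rw [sabaccRecA, ih (n + 1) (by omega), ih n (by omega)]
      have h3 : n % 3 = 0 ∨ n % 3 = 1 ∨ n % 3 = 2 := by omega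
      rcases h3 with h | h | h
      · have h1 : (n + 1) % 3 = 1 := by omega
        have h2 : (n + 2) % 3 = 2 := by omega
        simp [h, h1, h2]
      · have h1 : (n + 1) % 3 = 2 := by omega
        have h2 : (n + 2) % 3 = 0 := by omega
        simp [h, h1, h2]
      · have h1 : (n + 1) % 3 = 0 := by omega
        have h2 : (n + 2) % 3 = 1 := by omega
        simp only [h, h1, h2]
        by_cases hp : p1 = p0 <;> simp [hp]

-- ===== VERDICT (by name: the statement is the Claim_ definition above) =====
theorem sabacc_winnder_spec : Claim_equal_sabacc_winnder := by
  intro cards p0 p1 _ hpre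
  unfold Pre_sabacc_winnder at hpre
  unfold Spec_sabacc_winnder sabacc_winnder sabacc_winnder_alt
  rw [sabaccRecA_closed, PySem.Int.mod_eq_emod_of_pos (by omega : (0:Int) < 3)]
  have hmod : cards % 3 = ((cards.toNat % 3 : Nat) : Int) := by omega
  have h3 : cards.toNat % 3 = 0 ∨ cards.toNat % 3 = 1 ∨ cards.toNat % 3 = 2 := by omega
  rcases h3 with h | h | h <;> simp [hmod, h]
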